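-- pv_equiv track=rewrite | github.com/iLearn-Lab/ICASSP26-MELT | MELT/datasets.py | concat_text
-- ===== SOURCE A (Python) =====
-- def concat_text(captions):
--     sentences = captions.split('.')
--     split_animal1 = []
--     for sentence in sentences:
--         dot_se = sentence.split(',')
--         for dot in dot_se:
--             while_se = dot.split('while')
--             for while_s in while_se:
--                 if 'animal1' in while_s and 'animal2' not in while_s:
--                     continue
--                 split_animal1.append(while_s)
--
--     text = '.'.join(split_animal1).replace("while", "").replace("both", "").replace("animal1's", "").replace("animal2's", "")
--
--     token = text.split(" ")
--     if len(token) > 60: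
--         token = token[-60:]
--     return ' '.join(token)
-- ===== SOURCE B (Python) =====
-- def _flush(buf, out):
--     frag = ''.join(buf)
--     if not ('animal1' in frag and 'animal2' not in frag):
--         out.append(frag)
--
--
-- def _cut(text, k):
--     # drop through k spaces from the left (k never exceeds the space count)
--     while k:
--         text = text[text.index(' ') + 1:]
--         k -= 1
--     return text
--
--
-- def concat_text(captions):
--     # single left-to-right scanner: fragments are flushed (and filtered) on the fly,
--     # no split calls; truncation cuts after the 60th space from the right.
--     out = []
--     buf = []
--     i, n = 0, len(captions)
--     while i < n:
--         if captions.startswith('while', i):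
--             _flush(buf, out)
--             buf = []
--             i += 5
--         elif captions[i] in '.,':
--             _flush(buf, out)
--             buf = []
--             i += 1
--         else:
--             buf.append(captions[i])
--             i += 1
--     _flush(buf, out)
--     text = '.'.join(out)
--     for pat in ("while", "both", "animal1's", "animal2's"):
--         text = text.replace(pat, '')
--     spaces = sum(1 for ch in text if ch == ' ')
--     if spaces >= 60:
--         text = _cut(text, spaces - 59)
--     return text
-- ===== Notes on version B (the rewrite author's own statement) =====
-- stated objective: alternative
-- what changed: A's three nested split passes plus list slicing are replaced by one streaming character scanner that flushes and filters fragments on the fly, followed by a truncation that cuts the text after the 60th space from the right instead of tokenizing and slicing.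
import Mathlib
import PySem

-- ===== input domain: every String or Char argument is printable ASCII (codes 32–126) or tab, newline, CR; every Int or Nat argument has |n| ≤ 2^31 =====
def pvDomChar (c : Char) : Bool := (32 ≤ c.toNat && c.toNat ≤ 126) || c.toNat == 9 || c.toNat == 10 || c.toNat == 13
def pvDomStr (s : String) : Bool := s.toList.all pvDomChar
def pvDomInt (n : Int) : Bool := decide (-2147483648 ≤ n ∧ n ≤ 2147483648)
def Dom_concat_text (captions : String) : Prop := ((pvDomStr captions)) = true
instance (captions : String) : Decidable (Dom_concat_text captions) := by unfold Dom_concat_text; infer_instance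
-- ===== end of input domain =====

-- B replaces A's three nested split passes and list slicing by one streaming character
-- scanner that flushes/filters fragments on the fly, and truncates by cutting the text
-- after the 60th space from the right instead of tokenizing and slicing.

-- ===== PORT A =====
-- Python's s.split(sep) with the literal nonempty seps '.', ',', 'while', ' ' never raises,
-- so (PySem.Str.split? s sep).getD [] is always the 'some' branch.
def concat_text (captions : String) : String :=
  let sentences := (PySem.Str.split? captions ".").getD []
  let split_animal1 := sentences.foldl (fun acc sentence =>
      ((PySem.Str.split? sentence ",").getD []).foldl (fun acc dot =>
        ((PySem.Str.split? dot "while").getD []).foldl (fun acc while_s =>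
          if PySem.Str.isIn "animal1" while_s && !(PySem.Str.isIn "animal2" while_s) then acc
          else acc ++ [while_s]) acc) acc) ([] : List String)
  let text := PySem.Str.replace (PySem.Str.replace (PySem.Str.replace (PySem.Str.replace
      (PySem.Str.join "." split_animal1) "while" "") "both" "") "animal1's" "") "animal2's" ""
  let token := (PySem.Str.split? text " ").getD []
  let token := if token.length > 60 then PySem.List.slice token (some (-60)) none else token
  PySem.Str.join " " token

-- ===== PORT B =====
-- _flush(buf, out): append ''.join(buf) to out unless the fragment mentions animal1 but not animal2.
def pvFlush (buf : List Char) (out : List String) : List String :=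
  let frag := String.ofList buf
  if PySem.Str.isIn "animal1" frag && !(PySem.Str.isIn "animal2" frag) then out
  else out ++ [frag]

-- the scanner while-loop over i: startswith('while', i) / captions[i] in '.,' / ordinary char.
def pvScan (l : List Char) (buf : List Char) (out : List String) : List String :=
  match l with
  | [] => pvFlush buf out
  | c :: rest =>
      if List.isPrefixOf ['w','h','i','l','e'] (c :: rest) then
        pvScan (List.drop 4 rest) [] (pvFlush buf out)
      else if c = '.' ∨ c = ',' then pvScan rest [] (pvFlush buf out)
      else pvScan rest (buf ++ [c]) out
termination_by l.length
decreasing_by all_goals (simp [List.length_drop]; try omega)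

-- _cut(text, k): 'text = text[text.index(' ')+1:]' drops through the FIRST space, i.e.
-- dropWhile-not-space then one more char; exact here since k never exceeds the space count.
def pvCut (k : Nat) (l : List Char) : List Char :=
  match k with
  | 0 => l
  | k + 1 => pvCut k ((l.dropWhile (fun c => c ≠ ' ')).drop 1)

def concat_text_alt (captions : String) : String :=
  let kept := pvScan captions.toList [] []
  let text := ["while", "both", "animal1's", "animal2's"].foldl
      (fun t p => PySem.Str.replace t p "") (PySem.Str.join "." kept)
  let spaces := (text.toList.filter (fun ch => ch == ' ')).length
  if 60 ≤ spaces then String.ofList (pvCut (spaces - 59) text.toList) else text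

-- ===== PRECONDITION & SPEC =====
def Spec_concat_text (captions : String) (out : String) : Prop := out = concat_text_alt captions
instance (captions : String) (out : String) : Decidable (Spec_concat_text captions out) := by unfold Spec_concat_text; infer_instance

-- ===== CLAIM (what is proved, stated in full; the proofs are below) =====
def Claim_equal_concat_text : Prop := ∀ (captions : String), Dom_concat_text captions → Spec_concat_text captions (concat_text captions)

-- ===== LEMMAS AND PROOFS =====

-- Simple recursive model of Python's str.split(sep) for nonempty sep.
def pvSos (sep : List Char) (l : List Char) : List (List Char) :=
  match l with
  | [] => [[]]
  | c :: rest =>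
      if List.isPrefixOf sep (c :: rest) then [] :: pvSos sep (List.drop (sep.length - 1) rest)
      else (pvSos sep rest).modifyHead (c :: ·)
termination_by l.length
decreasing_by all_goals (simp [List.length_drop]; try omega)

-- Multi-delimiter split model: fragments between '.', ',' and 'while', in order.
def pvMSplit (l : List Char) : List (List Char) :=
  match l with
  | [] => [[]]
  | c :: rest =>
      if List.isPrefixOf ['w','h','i','l','e'] (c :: rest) then [] :: pvMSplit (List.drop 4 rest)
      else if c = '.' ∨ c = ',' then [] :: pvMSplit rest
      else (pvMSplit rest).modifyHead (c :: ·)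
termination_by l.length
decreasing_by all_goals (simp [List.length_drop]; try omega)

theorem pvSos_head_prefix (sep l : List Char) :
    ∃ a as, pvSos sep l = a :: as ∧ a <+: l := by
  fun_induction pvSos sep l with
  | case1 => exact ⟨[], [], rfl, List.nil_prefix⟩
  | case2 c rest _ _ => exact ⟨[], _, rfl, List.nil_prefix⟩
  | case3 c rest _ ih =>
    obtain ⟨a, as, ha, hp⟩ := ih
    exact ⟨c :: a, as, by simp [ha], List.cons_prefix_cons.mpr ⟨rfl, hp⟩⟩

theorem pvModifyHead_id (l : List (List Char)) : List.modifyHead (fun x => x) l = l := by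
  cases l <;> simp

theorem pvGo_spec (sep : List Char) (hsep : sep ≠ []) :
    ∀ fuel (l cur : List Char) (accl : List (List Char)), l.length ≤ fuel →
      PySem.Chars.splitOn.go sep fuel l cur accl =
        accl.reverse ++ (pvSos sep l).modifyHead (cur.reverse ++ ·) := by
  intro fuel
  induction fuel with
  | zero =>
    intro l cur accl hl
    have hnil : l = [] := List.eq_nil_of_length_eq_zero (Nat.le_zero.mp hl)
    subst hnil
    simp [PySem.Chars.splitOn.go, pvSos]
  | succ fuel ih =>
    intro l cur accl hl
    cases l with
    | nil => simp [PySem.Chars.splitOn.go, pvSos]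
    | cons c rest =>
      have hsl : 1 ≤ sep.length := List.length_pos_iff.mpr hsep
      by_cases hp : List.isPrefixOf sep (c :: rest) = true
      · have hstep : PySem.Chars.splitOn.go sep (fuel + 1) (c :: rest) cur accl =
            PySem.Chars.splitOn.go sep fuel (List.drop sep.length (c :: rest)) [] (cur.reverse :: accl) := by
          simp [PySem.Chars.splitOn.go, hp]
        have hdrop : List.drop sep.length (c :: rest) = List.drop (sep.length - 1) rest := by
          conv_lhs => rw [show sep.length = (sep.length - 1) + 1 from by omega, List.drop_succ_cons]
        have hlen : (List.drop sep.length (c :: rest)).length ≤ fuel := by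
          simp only [List.length_drop, List.length_cons] at *
          omega
        rw [hstep, ih _ _ _ hlen, hdrop]
        simp [pvSos, hp, pvModifyHead_id]
      · have hstep : PySem.Chars.splitOn.go sep (fuel + 1) (c :: rest) cur accl =
            PySem.Chars.splitOn.go sep fuel rest (c :: cur) accl := by
          simp [PySem.Chars.splitOn.go, hp]
        have hlen : rest.length ≤ fuel := by
          simp only [List.length_cons] at hl; omega
        rw [hstep, ih _ _ _ hlen]
        simp [pvSos, hp, List.modifyHead_modifyHead]; rfl

theorem pvSplitOn_eq_sos (sep l : List Char) (hsep : sep ≠ []) :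
    PySem.Chars.splitOn l sep = pvSos sep l := by
  rw [PySem.Chars.splitOn, pvGo_spec sep hsep (l.length + 1) l [] [] (by omega)]
  simp [pvModifyHead_id]

def pvW : List Char := ['w','h','i','l','e']

def pvG (a : List Char) : List (List Char) := (pvSos [','] a).flatMap (pvSos pvW)

def pvF (l : List Char) : List (List Char) := (pvSos ['.'] l).flatMap pvG

theorem pvSos_single_cons (d c : Char) (rest : List Char) :
    pvSos [d] (c :: rest) =
      if d = c then [] :: pvSos [d] rest else (pvSos [d] rest).modifyHead (c :: ·) := by
  by_cases h : d = c
  · simp [pvSos, List.isPrefixOf, h]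
  · simp [pvSos, List.isPrefixOf, h]

theorem pvSosW_append (r : List Char) : pvSos pvW (pvW ++ r) = [] :: pvSos pvW r := by
  simp [pvW, pvSos, List.isPrefixOf]

theorem pvSosW_cons (c : Char) (b : List Char) (h : ¬ pvW <+: (c :: b)) :
    pvSos pvW (c :: b) = (pvSos pvW b).modifyHead (c :: ·) := by
  have h' : pvW.isPrefixOf (c :: b) = false := by
    rw [Bool.eq_false_iff]
    intro hx
    exact h (List.isPrefixOf_iff_prefix.mp hx)
  rw [pvSos]
  simp [h']

theorem pvSos_single_W (d : Char) (hw : d ≠ 'w') (hh : d ≠ 'h') (hi : d ≠ 'i')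
    (hl : d ≠ 'l') (he : d ≠ 'e') (r : List Char) :
    pvSos [d] (pvW ++ r) = (pvSos [d] r).modifyHead (pvW ++ ·) := by
  show pvSos [d] ('w' :: 'h' :: 'i' :: 'l' :: 'e' :: r) = _
  rw [pvSos_single_cons, if_neg hw, pvSos_single_cons, if_neg hh, pvSos_single_cons,
    if_neg hi, pvSos_single_cons, if_neg hl, pvSos_single_cons, if_neg he]
  simp only [List.modifyHead_modifyHead]
  rfl

theorem pvG_nil : pvG [] = [[]] := by
  simp [pvG, pvSos]

theorem pvG_W (a : List Char) : pvG (pvW ++ a) = [] :: pvG a := by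
  obtain ⟨b, bs, hb, _⟩ := pvSos_head_prefix [','] a
  rw [pvG, pvSos_single_W ',' (by decide) (by decide) (by decide) (by decide) (by decide), hb]
  simp only [List.modifyHead_cons, List.flatMap_cons, pvSosW_append]
  simp [pvG, hb]

theorem pvG_comma (a : List Char) : pvG (',' :: a) = [] :: pvG a := by
  rw [pvG, pvSos_single_cons, if_pos rfl]
  simp [pvG, pvSos]

theorem pvG_cons (c : Char) (a rest : List Char) (hc : c ≠ ',')
    (hpa : a <+: rest) (hW : ¬ pvW <+: (c :: rest)) :
    pvG (c :: a) = (pvG a).modifyHead (c :: ·) ∧ pvG a ≠ [] := by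
  obtain ⟨b, bs, hb, hpb⟩ := pvSos_head_prefix [','] a
  obtain ⟨w, ws, hwb, _⟩ := pvSos_head_prefix pvW b
  have hWb : ¬ pvW <+: (c :: b) := by
    intro hx
    exact hW (hx.trans (List.cons_prefix_cons.mpr ⟨rfl, hpb.trans hpa⟩))
  constructor
  · rw [pvG, pvSos_single_cons, if_neg (fun h => hc h.symm), hb]
    simp only [List.modifyHead_cons, List.flatMap_cons, pvSosW_cons c b hWb, hwb]
    simp [pvG, hb, hwb]
  · simp [pvG, hb, hwb]

theorem pvMain (l : List Char) :
    pvMSplit l = (pvSos ['.'] l).flatMap (fun a => (pvSos [','] a).flatMap (pvSos ['w','h','i','l','e'])) := by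
  show pvMSplit l = pvF l
  fun_induction pvMSplit l with
  | case1 => simp [pvF, pvG, pvSos]
  | case2 c rest h ih =>
    obtain ⟨t, ht⟩ := List.isPrefixOf_iff_prefix.mp h
    simp only [List.cons_append, List.nil_append, List.cons.injEq] at ht
    obtain ⟨hc1, hc2⟩ := ht
    subst hc1; subst hc2
    simp only [List.drop_succ_cons, List.drop_zero] at ih ⊢
    show [] :: pvMSplit t = pvF (pvW ++ t)
    obtain ⟨a, as, ha, _⟩ := pvSos_head_prefix ['.'] t
    rw [pvF, pvSos_single_W '.' (by decide) (by decide) (by decide) (by decide) (by decide), ha]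
    simp only [List.modifyHead_cons, List.flatMap_cons, pvG_W]
    simp [pvF, ha, ih]
  | case3 c rest h hc ih =>
    rcases hc with hc | hc <;> subst hc
    · rw [show pvF ('.' :: rest) = (pvSos ['.'] ('.' :: rest)).flatMap pvG from rfl,
        pvSos_single_cons, if_pos rfl]
      simp [pvF, pvG_nil, ih]
    · obtain ⟨a, as, ha, _⟩ := pvSos_head_prefix ['.'] rest
      rw [show pvF (',' :: rest) = (pvSos ['.'] (',' :: rest)).flatMap pvG from rfl,
        pvSos_single_cons, if_neg (by decide), ha]
      simp only [List.modifyHead_cons, List.flatMap_cons, pvG_comma]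
      simp [pvF, ha, ih]
  | case4 c rest h hc ih =>
    have hW : ¬ pvW <+: (c :: rest) := fun hx => h (List.isPrefixOf_iff_prefix.mpr hx)
    have hcd : c ≠ '.' := fun hx => hc (Or.inl hx)
    have hcc : c ≠ ',' := fun hx => hc (Or.inr hx)
    obtain ⟨a, as, ha, hpa⟩ := pvSos_head_prefix ['.'] rest
    obtain ⟨hga, hne⟩ := pvG_cons c a rest hcc hpa hW
    rw [show pvF (c :: rest) = (pvSos ['.'] (c :: rest)).flatMap pvG from rfl,
      pvSos_single_cons, if_neg (fun hx => hcd hx.symm), ha]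
    simp only [List.modifyHead_cons, List.flatMap_cons, hga]
    rw [ih, pvF, ha, List.flatMap_cons]
    obtain ⟨x, xs, hx⟩ : ∃ x xs, pvG a = x :: xs := by
      cases hga' : pvG a with
      | nil => exact absurd hga' hne
      | cons x xs => exact ⟨_, _, rfl⟩
    simp [hx]

theorem pvFoldl_skip (p : String → Bool) (l : List String) : ∀ acc : List String,
    l.foldl (fun acc x => if p x then acc else acc ++ [x]) acc
      = acc ++ l.filter (fun x => !p x) := by
  induction l with
  | nil => intro acc; simp
  | cons x xs ih => intro acc; by_cases h : p x <;> simp [h, ih]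

theorem pvMiddle (p : String → Bool) (g : String → List String) (l : List String) :
    ∀ acc : List String,
    l.foldl (fun acc d => (g d).foldl (fun acc x => if p x then acc else acc ++ [x]) acc) acc
      = acc ++ l.flatMap (fun d => (g d).filter (fun x => !p x)) := by
  induction l with
  | nil => intro acc; simp
  | cons x xs ih => intro acc; simp [pvFoldl_skip, List.flatMap_def]

theorem pvOuter (p : String → Bool) (g h : String → List String) (l : List String) :
    ∀ acc : List String,
    l.foldl (fun acc s => (g s).foldl
      (fun acc d => (h d).foldl (fun acc x => if p x then acc else acc ++ [x]) acc) acc) acc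
      = acc ++ l.flatMap (fun s => (g s).flatMap (fun d => (h d).filter (fun x => !p x))) := by
  induction l with
  | nil => intro acc; simp
  | cons x xs ih => intro acc; simp [pvMiddle, List.flatMap_def]

theorem pvSplitGetD (s sep : String) (h : sep.toList ≠ []) :
    (PySem.Str.split? s sep).getD []
      = (PySem.Chars.splitOn s.toList sep.toList).map String.ofList := by
  simp [PySem.Str.split?, PySem.Chars.split?, List.isEmpty_iff, h]

-- B's scanner computes exactly the filtered multi-split fragments.
theorem pvMSplit_nil : pvMSplit [] = [[]] := by
  simp [pvMSplit]

theorem pvMSplit_while (c : Char) (rest : List Char)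
    (h : List.isPrefixOf ['w','h','i','l','e'] (c :: rest) = true) :
    pvMSplit (c :: rest) = [] :: pvMSplit (List.drop 4 rest) := by
  rw [pvMSplit]; simp [h]

theorem pvMSplit_delim (c : Char) (rest : List Char)
    (h : ¬ List.isPrefixOf ['w','h','i','l','e'] (c :: rest) = true)
    (hc : c = '.' ∨ c = ',') :
    pvMSplit (c :: rest) = [] :: pvMSplit rest := by
  rw [pvMSplit]; simp [h, hc]

theorem pvMSplit_char (c : Char) (rest : List Char)
    (h : ¬ List.isPrefixOf ['w','h','i','l','e'] (c :: rest) = true)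
    (hc : ¬ (c = '.' ∨ c = ',')) :
    pvMSplit (c :: rest) = (pvMSplit rest).modifyHead (c :: ·) := by
  rw [pvMSplit]; simp [h, hc]

theorem pvFlush_eq (buf : List Char) (out : List String) :
    pvFlush buf out = out ++ List.filter
      (fun p => !(PySem.Str.isIn "animal1" p && !(PySem.Str.isIn "animal2" p)))
      [String.ofList buf] := by
  unfold pvFlush
  cases hb : (PySem.Str.isIn "animal1" (String.ofList buf) && !(PySem.Str.isIn "animal2" (String.ofList buf))) with
  | true => simp only [hb, if_true, List.filter_cons, Bool.not_true, Bool.false_eq_true,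
      if_false, List.filter_nil, List.append_nil]
  | false => simp only [hb, Bool.false_eq_true, if_false, List.filter_cons, Bool.not_false,
      if_true, List.filter_nil]

theorem pvFilter_cons_append {α : Type} (p : α → Bool) (a : α) (r : List α) :
    List.filter p (a :: r) = List.filter p [a] ++ List.filter p r := by
  cases h : p a <;> simp [h]

theorem pvScan_spec (l buf : List Char) (out : List String) :
    pvScan l buf out = out ++
      (((pvMSplit l).modifyHead (buf ++ ·)).map String.ofList).filter
        (fun p => !(PySem.Str.isIn "animal1" p && !(PySem.Str.isIn "animal2" p))) := by
  fun_induction pvScan l buf out with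
  | case1 buf out =>
    rw [pvMSplit_nil]
    simp only [List.modifyHead_cons, List.append_nil, List.map_cons, List.map_nil]
    exact pvFlush_eq buf out
  | case2 buf out c rest h ih =>
    rw [pvMSplit_while c rest h]
    simp only [List.nil_append] at ih
    rw [pvModifyHead_id] at ih
    simp only [List.modifyHead_cons, List.append_nil, List.map_cons]
    rw [pvFilter_cons_append, ih, pvFlush_eq, List.append_assoc]
  | case3 buf out c rest h hc ih =>
    rw [pvMSplit_delim c rest h hc]
    simp only [List.nil_append] at ih
    rw [pvModifyHead_id] at ih
    simp only [List.modifyHead_cons, List.append_nil, List.map_cons]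
    rw [pvFilter_cons_append, ih, pvFlush_eq, List.append_assoc]
  | case4 buf out c rest h hc ih =>
    rw [pvMSplit_char c rest h hc, List.modifyHead_modifyHead, ih]
    have hfun : ((fun x => buf ++ x) ∘ (fun x => c :: x)) = (fun x : List Char => buf ++ [c] ++ x) := by
      funext x; simp
    rw [hfun]

-- A's triple split-fold produces the same fragment list as B's scanner.
theorem pvFrag_eq (captions : String) :
    ((PySem.Str.split? captions ".").getD []).foldl (fun acc sentence =>
      ((PySem.Str.split? sentence ",").getD []).foldl (fun acc dot =>
        ((PySem.Str.split? dot "while").getD []).foldl (fun acc while_s =>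
          if PySem.Str.isIn "animal1" while_s && !(PySem.Str.isIn "animal2" while_s) then acc
          else acc ++ [while_s]) acc) acc) ([] : List String)
    = pvScan captions.toList [] [] := by
  have h1 : (PySem.Str.split? captions ".").getD []
      = (PySem.Chars.splitOn captions.toList ['.']).map String.ofList :=
    pvSplitGetD captions "." (by decide)
  have h2 : ∀ s : String, (PySem.Str.split? s ",").getD []
      = (PySem.Chars.splitOn s.toList [',']).map String.ofList :=
    fun s => pvSplitGetD s "," (by decide)
  have h3 : ∀ s : String, (PySem.Str.split? s "while").getD []
      = (PySem.Chars.splitOn s.toList ['w','h','i','l','e']).map String.ofList :=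
    fun s => pvSplitGetD s "while" (by decide)
  have h4 : ∀ l : List Char, PySem.Chars.splitOn l ['.'] = pvSos ['.'] l :=
    fun l => pvSplitOn_eq_sos _ l (by decide)
  have h5 : ∀ l : List Char, PySem.Chars.splitOn l [','] = pvSos [','] l :=
    fun l => pvSplitOn_eq_sos _ l (by decide)
  have h6 : ∀ l : List Char, PySem.Chars.splitOn l ['w','h','i','l','e'] = pvSos ['w','h','i','l','e'] l :=
    fun l => pvSplitOn_eq_sos _ l (by decide)
  rw [pvOuter (fun w => PySem.Str.isIn "animal1" w && !(PySem.Str.isIn "animal2" w))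
    (fun s => (PySem.Str.split? s ",").getD [])
    (fun d => (PySem.Str.split? d "while").getD [])]
  rw [pvScan_spec]
  simp only [h1, h2, h3, h4, h5, h6, pvMain, List.nil_append, pvModifyHead_id,
    List.flatMap_map, List.filter_map, List.filter_flatMap, List.map_flatMap,
    String.toList_ofList, PySem.Str.isIn_eq]

-- the space count determines the token count
theorem pvSos_space_length (t : List Char) :
    (pvSos [' '] t).length = (t.filter (fun ch => ch == ' ')).length + 1 := by
  induction t with
  | nil => simp [pvSos]
  | cons c rest ih =>
    rw [pvSos_single_cons]
    by_cases h : (' ' : Char) = c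
    · subst h; simp [ih]
    · obtain ⟨a, as, ha, _⟩ := pvSos_head_prefix [' '] rest
      have hc : (c == ' ') = false := by
        simp; exact fun hx => h hx.symm
      simp [h, ha, hc]
      have := ih
      rw [ha] at this
      simp at this
      omega

-- decomposition of the split at the first space
theorem pvSos_space_step (t : List Char) (h : 1 ≤ (t.filter (fun ch => ch == ' ')).length) :
    pvSos [' '] t = (t.takeWhile (fun c => c ≠ ' ')) :: pvSos [' '] ((t.dropWhile (fun c => c ≠ ' ')).drop 1)
      ∧ ((((t.dropWhile (fun c => c ≠ ' ')).drop 1).filter (fun ch => ch == ' ')).length) + 1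
          = (t.filter (fun ch => ch == ' ')).length := by
  induction t with
  | nil => simp at h
  | cons c rest ih =>
    by_cases hc : c = ' '
    · subst hc
      rw [pvSos_single_cons, if_pos rfl]
      simp
    · have hcb : (c == ' ') = false := by simp [hc]
      have hrest : 1 ≤ (rest.filter (fun ch => ch == ' ')).length := by
        simpa [List.filter_cons, hcb] using h
      obtain ⟨h1, h2⟩ := ih hrest
      constructor
      · rw [pvSos_single_cons, if_neg (fun hx => hc hx.symm), h1]
        simp [hc]
      · simpa [List.dropWhile_cons, hc, List.filter_cons, hcb] using h2

-- pull a char out of the head of a join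
theorem pvJoin_cons_head (sep : List Char) (c : Char) (a : List Char) (rest : List (List Char)) :
    PySem.Chars.join sep ((c :: a) :: rest) = c :: PySem.Chars.join sep (a :: rest) := by
  cases rest with
  | nil => simp [PySem.Chars.join_singleton]
  | cons b bs => simp [PySem.Chars.join_cons_cons]

-- joining the split on ' ' gives the string back
theorem pvJoin_sos (t : List Char) : PySem.Chars.join [' '] (pvSos [' '] t) = t := by
  induction t with
  | nil => simp [pvSos, PySem.Chars.join_singleton]
  | cons c rest ih =>
    obtain ⟨b, bs, hb, _⟩ := pvSos_head_prefix [' '] rest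
    rw [pvSos_single_cons]
    by_cases h : (' ' : Char) = c
    · subst h
      rw [if_pos rfl, hb, PySem.Chars.join_cons_cons]
      rw [hb] at ih
      simpa using ih
    · rw [if_neg h, hb, List.modifyHead_cons, pvJoin_cons_head, ← hb, ih]

-- the core truncation lemma: joining the last tokens = cutting after the matching space
theorem pvJoin_drop_eq_cut (k : Nat) : ∀ t : List Char,
    k ≤ (t.filter (fun ch => ch == ' ')).length →
    PySem.Str.join " " (((pvSos [' '] t).map String.ofList).drop k) = String.ofList (pvCut k t) := by
  induction k with
  | zero =>
    intro t _
    apply String.toList_inj.mp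
    rw [PySem.Str.toList_join]
    have hmm : ((pvSos [' '] t).map String.ofList).map String.toList = pvSos [' '] t := by
      rw [List.map_map]
      simp [Function.comp_def]
    rw [List.drop_zero, hmm, show (" " : String).toList = [' '] from rfl]
    simpa [pvCut] using pvJoin_sos t
  | succ k ih =>
    intro t h
    obtain ⟨h1, h2⟩ := pvSos_space_step t (by omega)
    rw [h1]
    simp only [List.map_cons, List.drop_succ_cons]
    rw [show pvCut (k + 1) t = pvCut k ((t.dropWhile (fun c => c ≠ ' ')).drop 1) from rfl]
    exact ih _ (by omega)

-- slice with start -60 on a list longer than 60 is drop (len - 60)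
theorem pvSlice_last60 (l : List String) (h : l.length > 60) :
    PySem.List.slice l (some (-60)) none = l.drop (l.length - 60) := by
  have hc : PySem.List.clampIdx l.length (-60) = l.length - 60 := by
    unfold PySem.List.clampIdx
    rw [if_pos (by norm_num), if_neg (by omega)]
    omega
  simp only [PySem.List.slice, hc]
  apply List.take_of_length_le
  simp only [List.length_drop]
  omega

-- ===== VERDICT (by name: the statement is the Claim_ definition above) =====
theorem concat_text_spec : Claim_equal_concat_text := by
  intro captions _
  unfold Spec_concat_text concat_text concat_text_alt
  dsimp only
  rw [pvFrag_eq]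
  simp only [List.foldl]
  set kept := pvScan captions.toList [] [] with hkept
  set text := PySem.Str.replace (PySem.Str.replace (PySem.Str.replace (PySem.Str.replace
      (PySem.Str.join "." kept) "while" "") "both" "") "animal1's" "") "animal2's" "" with htext
  have htok : (PySem.Str.split? text " ").getD [] = (pvSos [' '] text.toList).map String.ofList := by
    rw [pvSplitGetD text " " (by decide), show (" " : String).toList = [' '] from rfl,
      pvSplitOn_eq_sos [' '] text.toList (by decide)]
  rw [htok]
  have hlen : ((pvSos [' '] text.toList).map String.ofList).length
      = (text.toList.filter (fun ch => ch == ' ')).length + 1 := by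
    simp [pvSos_space_length]
  by_cases hsp : 60 ≤ (text.toList.filter (fun ch => ch == ' ')).length
  · rw [if_pos (by omega), if_pos hsp]
    rw [pvSlice_last60 _ (by omega)]
    rw [hlen, show (text.toList.filter (fun ch => ch == ' ')).length + 1 - 60
      = (text.toList.filter (fun ch => ch == ' ')).length - 59 from by omega]
    exact pvJoin_drop_eq_cut _ _ (by omega)
  · rw [if_neg (by omega), if_neg hsp]
    have := pvJoin_drop_eq_cut 0 text.toList (by omega)
    simpa [pvCut] using this
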